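-- pv_equiv track=rewrite | github.com/titi867/Musk-mod-0 | Modulo3_Ejercicios/ej10.py | __verificar_asistencias
-- ===== SOURCE A (Python) =====
-- def __verificar_asistencias(asistencias_mes):
--
--     for mes, numero_asistencias in asistencias_mes.items():
--         if numero_asistencias < 4:
--             return 1
--
--     for numero_asistencias in asistencias_mes.values():
--         if 4 <= numero_asistencias <= 8:
--             return 2
--
--     return 3
-- ===== SOURCE B (Python) =====
-- def __verificar_asistencias(asistencias_mes):
--     if not asistencias_mes:
--         return 3
--     m = min(asistencias_mes.values())
--     if m < 4:
--         return 1
--     elif m <= 8: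
--         return 2
--     else:
--         return 3
-- ===== Notes on version B (the rewrite author's own statement) =====
-- stated objective: simpler
-- what changed: Replaces the two early-return scans with a single aggregate: compute min of the values once and classify it (min<4 -> 1, min<=8 -> 2, else 3), with the empty dict handled up front.
import Mathlib
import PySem

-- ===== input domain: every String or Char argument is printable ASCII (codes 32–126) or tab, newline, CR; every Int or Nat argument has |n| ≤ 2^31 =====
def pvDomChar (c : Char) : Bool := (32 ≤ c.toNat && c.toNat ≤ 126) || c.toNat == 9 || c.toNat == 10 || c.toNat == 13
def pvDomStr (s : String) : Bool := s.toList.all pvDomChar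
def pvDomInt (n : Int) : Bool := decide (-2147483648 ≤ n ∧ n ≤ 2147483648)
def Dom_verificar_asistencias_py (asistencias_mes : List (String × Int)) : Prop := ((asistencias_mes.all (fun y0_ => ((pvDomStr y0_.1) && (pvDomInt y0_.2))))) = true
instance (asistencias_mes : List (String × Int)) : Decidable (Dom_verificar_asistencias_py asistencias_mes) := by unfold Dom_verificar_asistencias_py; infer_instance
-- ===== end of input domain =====

-- B replaces A's two early-return scans by a single min-of-values aggregate, then classifies that minimum (simpler decomposition, same O(n) cost).


-- ===== PORT A =====
-- second loop of A: for numero_asistencias in values(): if 4 <= v <= 8: return 2 ; falls through to return 3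
def pvLoop2 : List Int → Int
  | [] => 3
  | v :: t => if 4 ≤ v ∧ v ≤ 8 then 2 else pvLoop2 t

-- first loop of A: for mes, v in items(): if v < 4: return 1 ; then runs the second loop over the values
def pvLoop1 : List (String × Int) → List Int → Int
  | [], vals => pvLoop2 vals
  | p :: t, vals => if p.2 < 4 then 1 else pvLoop1 t vals

def verificar_asistencias_py (asistencias_mes : List (String × Int)) : Int :=
  pvLoop1 asistencias_mes (asistencias_mes.map Prod.snd)

-- ===== PORT B =====
def verificar_asistencias_py_alt (asistencias_mes : List (String × Int)) : Int :=
  if asistencias_mes = [] then 3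
  else
    match PySem.List.min? (asistencias_mes.map Prod.snd) (fun v => v) with
    | some m => if m < 4 then 1 else if m ≤ 8 then 2 else 3
    | none => 3

-- ===== PRECONDITION & SPEC =====
def Spec_verificar_asistencias_py (asistencias_mes : List (String × Int)) (out : Int) : Prop := out = verificar_asistencias_py_alt asistencias_mes
instance (asistencias_mes : List (String × Int)) (out : Int) : Decidable (Spec_verificar_asistencias_py asistencias_mes out) := by unfold Spec_verificar_asistencias_py; infer_instance

-- ===== CLAIM (what is proved, stated in full; the proofs are below) =====
def Claim_equal_verificar_asistencias_py : Prop := ∀ (asistencias_mes : List (String × Int)), Dom_verificar_asistencias_py asistencias_mes → Spec_verificar_asistencias_py asistencias_mes (verificar_asistencias_py asistencias_mes)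

-- ===== LEMMAS AND PROOFS =====
theorem pvLoop1_one (l : List (String × Int)) (vals : List Int)
    (h : ∃ p ∈ l, p.2 < 4) : pvLoop1 l vals = 1 := by
  induction l with
  | nil => simp at h
  | cons p t ih =>
    rcases h with ⟨q, hq, hlt⟩
    simp only [List.mem_cons] at hq
    rcases hq with rfl | hq
    · simp [pvLoop1, hlt]
    · by_cases hp : p.2 < 4
      · simp [pvLoop1, hp]
      · simp only [pvLoop1, if_neg hp]; exact ih ⟨q, hq, hlt⟩

theorem pvLoop1_skip (l : List (String × Int)) (vals : List Int)
    (h : ∀ p ∈ l, ¬ p.2 < 4) : pvLoop1 l vals = pvLoop2 vals := by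
  induction l with
  | nil => rfl
  | cons p t ih =>
    have hp := h p (by simp)
    simp only [pvLoop1, if_neg hp]
    exact ih (fun q hq => h q (by simp [hq]))

theorem pvLoop2_two (vals : List Int) (h : ∃ v ∈ vals, 4 ≤ v ∧ v ≤ 8) : pvLoop2 vals = 2 := by
  induction vals with
  | nil => simp at h
  | cons v t ih =>
    rcases h with ⟨w, hw, hr⟩
    simp only [List.mem_cons] at hw
    rcases hw with rfl | hw
    · simp [pvLoop2, hr]
    · by_cases hv : 4 ≤ v ∧ v ≤ 8
      · simp [pvLoop2, hv]
      · simp only [pvLoop2, if_neg hv]; exact ih ⟨w, hw, hr⟩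

theorem pvLoop2_three (vals : List Int) (h : ∀ v ∈ vals, ¬ (4 ≤ v ∧ v ≤ 8)) : pvLoop2 vals = 3 := by
  induction vals with
  | nil => rfl
  | cons v t ih =>
    simp only [pvLoop2, if_neg (h v (by simp))]
    exact ih (fun w hw => h w (by simp [hw]))

-- ===== VERDICT (by name: the statement is the Claim_ definition above) =====
theorem verificar_asistencias_py_spec : Claim_equal_verificar_asistencias_py := by
  intro xs _
  unfold Spec_verificar_asistencias_py verificar_asistencias_py verificar_asistencias_py_alt
  cases hxs : xs with
  | nil => simp [pvLoop1, pvLoop2]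
  | cons p t =>
    simp only [if_neg (by simp : p :: t ≠ [])]
    have hne : (p :: t).map Prod.snd ≠ [] := by simp
    obtain ⟨m, hm⟩ : ∃ m, PySem.List.min? ((p :: t).map Prod.snd) (fun v => v) = some m := by
      cases hmin : PySem.List.min? ((p :: t).map Prod.snd) (fun v => v) with
      | none => exact absurd (((PySem.List.min?_eq_none_iff _ _).mp hmin)) hne
      | some m => exact ⟨m, rfl⟩
    have hmem : m ∈ (p :: t).map Prod.snd := PySem.List.min?_mem hm
    have hmin : ∀ y ∈ (p :: t).map Prod.snd, m ≤ y := fun y hy => PySem.List.min?_isMin hm y hy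
    rw [hm]
    show pvLoop1 (p :: t) ((p :: t).map Prod.snd) = if m < 4 then 1 else if m ≤ 8 then 2 else 3
    by_cases h4 : m < 4
    · rw [if_pos h4]
      obtain ⟨q, hq, hq2⟩ := List.mem_map.mp hmem
      exact pvLoop1_one _ _ ⟨q, hq, by rw [hq2]; exact h4⟩
    · rw [if_neg h4]
      have hno : ∀ q ∈ p :: t, ¬ q.2 < 4 := by
        intro q hq hlt
        exact absurd (lt_of_le_of_lt (hmin q.2 (List.mem_map.mpr ⟨q, hq, rfl⟩)) hlt) h4
      rw [pvLoop1_skip _ _ hno]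
      by_cases h8 : m ≤ 8
      · rw [if_pos h8]
        exact pvLoop2_two _ ⟨m, hmem, le_of_not_gt h4, h8⟩
      · rw [if_neg h8]
        refine pvLoop2_three _ (fun v hv ⟨_, hv8⟩ => h8 (le_trans (hmin v hv) hv8))
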